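-- pv_equiv track=rewrite | github.com/axdbertuol/multi-tenant-project | src/iam/domain/services/shared/authorization_utils.py | check_permission_match
-- ===== SOURCE A (Python) =====
-- from typing import List, Optional, Set
--
-- def check_permission_match(
--     required_permission: str, user_permissions: List[str]
-- ) -> bool:
--     """
--     Check if user has required permission including wildcard matches.
--
--     Used in: RBACService, JWTService, AuthorizationService
--     """
--     # Check exact match
--     if required_permission in user_permissions:
--         return True
--
--     # Parse required permission
--     if ":" not in required_permission:
--         return False
--
--     resource_type, action = required_permission.split(":", 1)
--
--     # Check wildcard permissions
--     wildcards_to_check = [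
--         f"{resource_type}:*",  # Resource wildcard
--         f"*:{action}",  # Action wildcard
--         "*:*",  # Global wildcard
--     ]
--
--     return any(wildcard in user_permissions for wildcard in wildcards_to_check)
-- ===== SOURCE B (Python) =====
-- def check_permission_match(
--     required_permission: str, user_permissions: list
-- ) -> bool:
--     """Single pass over user_permissions, splitting each stored permission
--     instead of generating candidate wildcard strings."""
--     if ":" not in required_permission:
--         return required_permission in user_permissions
--
--     resource_type, action = required_permission.split(":", 1)
--     for up in user_permissions:
--         if up == required_permission:
--             return True
--         if ":" in up:
--             up_resource, up_action = up.split(":", 1)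
--             if (up_resource == resource_type or up_resource == "*") and (
--                 up_action == action or up_action == "*"
--             ):
--                 return True
--     return False
-- ===== Notes on version B (the rewrite author's own statement) =====
-- stated objective: alternative
-- what changed: B makes a single pass over user_permissions, splitting each stored permission on its first colon and comparing components against the required resource/action (with '*'), instead of building the three candidate wildcard strings and doing repeated membership scans.
import Mathlib
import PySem

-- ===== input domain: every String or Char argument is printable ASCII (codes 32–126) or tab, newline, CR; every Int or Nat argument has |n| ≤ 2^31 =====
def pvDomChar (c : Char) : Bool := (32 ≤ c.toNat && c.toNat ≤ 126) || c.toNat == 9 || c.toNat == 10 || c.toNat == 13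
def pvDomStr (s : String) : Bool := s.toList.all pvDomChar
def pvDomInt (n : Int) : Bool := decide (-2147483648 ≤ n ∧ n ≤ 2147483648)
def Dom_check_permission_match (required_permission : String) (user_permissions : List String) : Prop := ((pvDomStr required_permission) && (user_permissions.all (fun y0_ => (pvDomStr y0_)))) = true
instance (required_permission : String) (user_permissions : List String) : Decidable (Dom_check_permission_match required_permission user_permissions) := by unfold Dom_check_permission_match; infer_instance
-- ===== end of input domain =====

-- B replaces A's three generated wildcard strings and repeated list scans by one pass that
-- splits each stored permission on its first colon (objective: alternative decomposition).

-- ===== PORT A =====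
def check_permission_match (required_permission : String) (user_permissions : List String) : Bool :=
  -- Check exact match
  if user_permissions.contains required_permission then true
  -- Parse required permission
  else if !(PySem.Str.isIn ":" required_permission) then false
  else
    match PySem.Str.splitMax? required_permission ":" 1 with
    | some [resource_type, action] =>
        -- Check wildcard permissions
        ((resource_type ++ ":*") :: ("*:" ++ action) :: "*:*" :: []).any
          (fun wildcard => user_permissions.contains wildcard)
    | _ => false   -- unreachable: split(":",1) with ":" present yields exactly two parts

-- ===== PORT B =====
-- the two-component unpacking 'x, y = s.split(":", 1)' of Source B (the defaults are unreachable: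
-- split(sep, 1) with sep present always yields exactly two pieces)
def cpmSplit2 (s : String) : String × String :=
  match PySem.Str.splitMax? s ":" 1 with
  | some (a :: b :: _) => (a, b)
  | some [a] => (a, "")
  | some [] => ("", "")
  | none => ("", "")

def cpmAltLoop (required_permission resource_type action : String) : List String → Bool
  | [] => false
  | up :: rest =>
    if up == required_permission then true
    else if PySem.Str.isIn ":" up then
      if (((cpmSplit2 up).1 == resource_type || (cpmSplit2 up).1 == "*") &&
          ((cpmSplit2 up).2 == action || (cpmSplit2 up).2 == "*")) then true
      else cpmAltLoop required_permission resource_type action rest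
    else cpmAltLoop required_permission resource_type action rest

def check_permission_match_alt (required_permission : String) (user_permissions : List String) : Bool :=
  if !(PySem.Str.isIn ":" required_permission) then
    user_permissions.contains required_permission
  else
    cpmAltLoop required_permission (cpmSplit2 required_permission).1
      (cpmSplit2 required_permission).2 user_permissions

-- ===== PRECONDITION & SPEC =====
def Spec_check_permission_match (required_permission : String) (user_permissions : List String) (out : Bool) : Prop := out = check_permission_match_alt required_permission user_permissions
instance (required_permission : String) (user_permissions : List String) (out : Bool) : Decidable (Spec_check_permission_match required_permission user_permissions out) := by unfold Spec_check_permission_match; infer_instance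

-- ===== CLAIM (what is proved, stated in full; the proofs are below) =====
def Claim_equal_check_permission_match : Prop := ∀ (required_permission : String) (user_permissions : List String), Dom_check_permission_match required_permission user_permissions → Spec_check_permission_match required_permission user_permissions (check_permission_match required_permission user_permissions)

-- ===== LEMMAS AND PROOFS =====

-- go with maxsplit budget 0 returns immediately
theorem cpm_go_zero (fuel : Nat) (l cur : List Char) (acc : List (List Char)) :
    PySem.Chars.splitOnMax.go [':'] fuel 0 l cur acc = ((cur.reverse ++ l) :: acc).reverse := by
  cases fuel with
  | zero => rfl
  | succ f =>
    cases l with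
    | nil => simp [PySem.Chars.splitOnMax.go]
    | cons c t => simp [PySem.Chars.splitOnMax.go]

-- characterisation of go with sep = [':'], maxsplit budget 1
theorem cpm_go_one (fuel : Nat) (l cur : List Char) (acc : List (List Char))
    (h : l.length ≤ fuel) :
    PySem.Chars.splitOnMax.go [':'] fuel 1 l cur acc =
      if ':' ∈ l then
        acc.reverse ++ [cur.reverse ++ l.takeWhile (· ≠ ':'), (l.dropWhile (· ≠ ':')).tail]
      else acc.reverse ++ [cur.reverse ++ l] := by
  induction fuel generalizing l cur acc with
  | zero =>
    have : l = [] := List.length_eq_zero_iff.mp (Nat.le_zero.mp h)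
    subst this; simp [PySem.Chars.splitOnMax.go]
  | succ f ih =>
    cases l with
    | nil => simp [PySem.Chars.splitOnMax.go]
    | cons c t =>
      by_cases hc : c = ':'
      · subst hc
        simp only [PySem.Chars.splitOnMax.go, if_neg (by omega : ¬(1:Nat) = 0)]
        simp [cpm_go_zero]
      · have ht : t.length ≤ f := by simpa using h
        simp only [PySem.Chars.splitOnMax.go, if_neg (by omega : ¬(1:Nat) = 0)]
        rw [if_neg (by simp [List.isPrefixOf, Ne.symm hc])]
        rw [ih t (c :: cur) acc ht]
        by_cases hm : ':' ∈ t
        · rw [if_pos hm, if_pos (by simp [hm])]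
          rw [List.takeWhile_cons_of_pos (by simp [hc]), List.dropWhile_cons_of_pos (by simp [hc])]
          simp
        · rw [if_neg hm, if_neg (by simp [hm, Ne.symm hc])]
          simp

-- splitMax? on a string containing ':' yields the parts before / after the first colon
theorem cpm_splitMax_colon (s : String) (h : ':' ∈ s.toList) :
    PySem.Str.splitMax? s ":" 1 =
      some [String.ofList (s.toList.takeWhile (· ≠ ':')),
            String.ofList ((s.toList.dropWhile (· ≠ ':')).tail)] := by
  have hsep : (":" : String).toList = [':'] := rfl
  unfold PySem.Str.splitMax? PySem.Chars.splitMax? PySem.Chars.splitOnMax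
  rw [hsep, if_neg (by decide), if_neg (by omega), show ((1:Int).toNat) = 1 from rfl,
      cpm_go_one _ _ _ _ (by omega), if_pos h]
  simp

-- 'isIn ":" s' is membership of ':' in s.toList
theorem cpm_isIn_colon (s : String) : PySem.Str.isIn ":" s = true ↔ ':' ∈ s.toList := by
  rw [show PySem.Str.isIn ":" s = PySem.Chars.isIn [':'] s.toList from rfl,
      PySem.Chars.isIn_iff_infix]
  constructor
  · intro hinf
    exact (List.singleton_sublist).mp hinf.sublist
  · intro hmem
    obtain ⟨l₁, l₂, hl⟩ := List.append_of_mem hmem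
    rw [hl]
    exact ⟨l₁, l₂, by simp⟩

-- decomposition of a string containing ':' around its first colon
theorem cpm_decomp (l : List Char) (h : ':' ∈ l) :
    l = l.takeWhile (· ≠ ':') ++ ':' :: (l.dropWhile (· ≠ ':')).tail ∧
      ':' ∉ l.takeWhile (· ≠ ':') := by
  induction l with
  | nil => cases h
  | cons c t ih =>
    by_cases hc : c = ':'
    · subst hc
      simp
    · have ht : ':' ∈ t := by
        rcases List.mem_cons.mp h with h' | h'
        · exact absurd h'.symm hc
        · exact h'
      obtain ⟨h1, h2⟩ := ih ht
      rw [List.takeWhile_cons_of_pos (by simp [hc]), List.dropWhile_cons_of_pos (by simp [hc])]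
      refine ⟨by rw [List.cons_append, ← h1], ?_⟩
      simp only [List.mem_cons, not_or]
      exact ⟨fun he => hc he.symm, h2⟩

-- two colon-free prefixes: splitting at the first colon is injective
theorem cpm_colon_inj (a b a' b' : List Char) (ha : ':' ∉ a) (ha' : ':' ∉ a')
    (h : a ++ ':' :: b = a' ++ ':' :: b') : a = a' ∧ b = b' := by
  induction a generalizing a' with
  | nil =>
    cases a' with
    | nil => simpa using h
    | cons c t =>
      simp at h
      exact absurd (h.1 ▸ List.mem_cons_self) ha'
  | cons c t ih =>
    cases a' with
    | nil =>
      simp at h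
      exact absurd (h.1 ▸ List.mem_cons_self) ha
    | cons c' t' =>
      rw [List.mem_cons, not_or] at ha ha'
      simp at h
      obtain ⟨rfl, h2⟩ := h
      have := ih t' ha.2 ha'.2 h2
      exact ⟨by rw [this.1], this.2⟩

-- the element-wise test of B's loop, factored out for the proofs
def cpmElem (required_permission resource_type action up : String) : Bool :=
  if up == required_permission then true
  else if PySem.Str.isIn ":" up then
    ((cpmSplit2 up).1 == resource_type || (cpmSplit2 up).1 == "*") &&
    ((cpmSplit2 up).2 == action || (cpmSplit2 up).2 == "*")
  else false

theorem cpmAltLoop_cons (req res act up : String) (rest : List String) :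
    cpmAltLoop req res act (up :: rest) =
      (cpmElem req res act up || cpmAltLoop req res act rest) := by
  conv_lhs => rw [cpmAltLoop]
  unfold cpmElem
  by_cases h1 : up == req
  · simp [h1]
  · simp only [h1, Bool.false_eq_true, if_false]
    by_cases h2 : PySem.Str.isIn ":" up
    · simp only [h2, if_true]
      by_cases h3 : (((cpmSplit2 up).1 == res || (cpmSplit2 up).1 == "*") &&
          ((cpmSplit2 up).2 == act || (cpmSplit2 up).2 == "*")) <;> simp [h3]
    · rw [show PySem.Str.isIn ":" up = PySem.Chars.isIn [':'] up.toList from rfl] at h2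
      simp [h2]

theorem cpmAltLoop_eq_any (req res act : String) (l : List String) :
    cpmAltLoop req res act l = l.any (cpmElem req res act) := by
  induction l with
  | nil => rfl
  | cons up rest ih => rw [cpmAltLoop_cons, ih, List.any_cons]

-- per-element equivalence: B's split test equals A's membership in the four candidate strings
theorem cpmElem_eq (res act up : String) (hres : ':' ∉ res.toList) :
    cpmElem (res ++ ":" ++ act) res act up =
      (up == (res ++ ":" ++ act) || up == (res ++ ":*") || up == ("*:" ++ act) || up == "*:*") := by
  have heqstr : ∀ (x y : String), (x == y) = decide (x.toList = y.toList) := by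
    intro x y
    rcases Decidable.em (x = y) with hxy | hxy
    · simp [hxy]
    · have hne : ¬ x.toList = y.toList := fun h => hxy (String.toList_inj.mp h)
      simp [hxy, hne]
  have hofl : ∀ (cs : List Char), (String.ofList cs).toList = cs := by intro cs; simp
  have happ : ∀ (x y : String), (x ++ y).toList = x.toList ++ y.toList := by intro x y; simp
  have hcolon : (":" : String).toList = [':'] := rfl
  have hsa : (":*" : String).toList = [':', '*'] := rfl
  have hsb : ("*:" : String).toList = ['*', ':'] := rfl
  have hsc : ("*:*" : String).toList = ['*', ':', '*'] := rfl
  by_cases hq : up = res ++ ":" ++ act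
  · unfold cpmElem
    simp [hq]
  · unfold cpmElem
    rw [if_neg (by simp [hq])]
    by_cases hup : ':' ∈ up.toList
    · obtain ⟨ur, ua, hupl, hurn, hsplit⟩ :
          ∃ ur ua, up.toList = ur ++ ':' :: ua ∧ ':' ∉ ur ∧
            PySem.Str.splitMax? up ":" 1 = some [String.ofList ur, String.ofList ua] :=
        ⟨_, _, (cpm_decomp up.toList hup).1, (cpm_decomp up.toList hup).2,
          cpm_splitMax_colon up hup⟩
      have hsp2 : cpmSplit2 up = (String.ofList ur, String.ofList ua) := by
        simp [cpmSplit2, hsplit]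
      rw [if_pos ((cpm_isIn_colon up).mpr hup), hsp2]
      simp only [heqstr, hofl, happ]
      have inj := fun (a' b' : List Char) (ha' : ':' ∉ a') =>
        cpm_colon_inj ur ua a' b' hurn ha'
      rw [hupl]
      rw [Bool.eq_iff_iff]
      simp only [Bool.or_eq_true, Bool.and_eq_true, decide_eq_true_eq]
      constructor
      · rintro ⟨h5 | h5, h6 | h6⟩ <;> subst h5 <;> subst h6 <;> simp
      · rintro (((h5 | h5) | h5) | h5)
        · have := inj res.toList act.toList hres (by simpa using h5)
          exact ⟨Or.inl this.1, Or.inl this.2⟩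
        · have := inj res.toList ['*'] hres (by simpa using h5)
          exact ⟨Or.inl this.1, Or.inr this.2⟩
        · have := inj ['*'] act.toList (by decide) (by simpa using h5)
          exact ⟨Or.inr this.1, Or.inl this.2⟩
        · have := inj ['*'] ['*'] (by decide) (by simpa using h5)
          exact ⟨Or.inr this.1, Or.inr this.2⟩
    · have hiF : PySem.Chars.isIn [':'] up.toList = false := by
        cases hb : PySem.Chars.isIn [':'] up.toList
        · rfl
        · exact absurd ((cpm_isIn_colon up).mp hb) hup
      rw [if_neg (by simp [hiF])]
      have hnem : ∀ (x : String), ':' ∈ x.toList → (up == x) = false := by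
        intro x hx
        rw [heqstr]
        refine decide_eq_false (fun h => hup ?_)
        rw [← h] at hx
        exact hx
      rw [hnem (res ++ ":" ++ act) (by simp [happ, hcolon]),
          hnem (res ++ ":*") (by simp [happ, hsa]),
          hnem ("*:" ++ act) (by simp [happ, hsb]),
          hnem "*:*" (by simp [hsc])]
      simp

theorem check_permission_match_spec : Claim_equal_check_permission_match := by
  intro req ups _
  unfold Spec_check_permission_match
  by_cases hc : ':' ∈ req.toList
  · obtain ⟨resS, actS, hreq, hresn, hsplit, hsp2⟩ :
        ∃ r a : String, req = r ++ ":" ++ a ∧ ':' ∉ r.toList ∧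
          PySem.Str.splitMax? req ":" 1 = some [r, a] ∧ cpmSplit2 req = (r, a) := by
      refine ⟨String.ofList (req.toList.takeWhile (· ≠ ':')),
        String.ofList ((req.toList.dropWhile (· ≠ ':')).tail), ?_, ?_,
        cpm_splitMax_colon req hc, by simp [cpmSplit2, cpm_splitMax_colon req hc]⟩
      · apply String.toList_inj.mp
        simpa using (cpm_decomp req.toList hc).1
      · simpa using (cpm_decomp req.toList hc).2
    have hiT : PySem.Str.isIn ":" req = true := (cpm_isIn_colon req).mpr hc
    have hEl := fun up => cpmElem_eq resS actS up hresn
    unfold check_permission_match check_permission_match_alt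
    rw [hiT, hsplit, hsp2]
    simp only [Bool.not_true, Bool.false_eq_true, if_false]
    rw [cpmAltLoop_eq_any, Bool.eq_iff_iff]
    subst hreq
    simp only [List.any_eq_true, hEl]
    simp only [List.contains_eq_mem, Bool.if_true_left, Bool.or_eq_true,
      decide_eq_true_eq, List.any_eq_true, beq_iff_eq]
    constructor
    · rintro (h | ⟨x, hx, h⟩)
      · exact ⟨_, h, by tauto⟩
      · simp only [List.mem_cons, List.not_mem_nil, or_false] at hx
        rcases hx with rfl | rfl | rfl <;> exact ⟨_, h, by tauto⟩
    · rintro ⟨x, hx, ((rfl | rfl) | rfl) | rfl⟩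
      · exact Or.inl hx
      · exact Or.inr ⟨_, by simp, hx⟩
      · exact Or.inr ⟨_, by simp, hx⟩
      · exact Or.inr ⟨_, by simp, hx⟩
  · have hiF : PySem.Str.isIn ":" req = false := by
      cases hb : PySem.Str.isIn ":" req
      · rfl
      · exact absurd ((cpm_isIn_colon req).mp hb) hc
    unfold check_permission_match check_permission_match_alt
    rw [hiF]
    simp
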